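-- pv_equiv track=rewrite | github.com/GarbhitSingh/Shein-All-rounder- | mix3sp.py | strict_filter
-- ===== SOURCE A (Python) =====
-- def strict_filter(product, gender, category):
--     brick = product.get("brickNameText", "").lower()
--
--     if gender == "Men":
--         if category == "Bottoms":
--             return any(x in brick for x in ["pant", "trouser", "jean", "short"])
--         if category == "Shoes":
--             return any(x in brick for x in ["shoe", "sneaker", "boot", "sandal", "slipper", "loafer"])
--         return True
--
--     if gender == "Women":
--         if category == "Shoes":
--             return any(x in brick for x in ["shoe", "heel", "sandal", "boot", "slipper"])
--         return True
--
--     return True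
-- ===== SOURCE B (Python) =====
-- # Flat rule table scanned once with an accumulator: a product is kept unless
-- # its (gender, category) pair is restricted by some rule and no rule keyword
-- # occurs in the brick name.
-- RULES = [
--     ("Men", "Bottoms", "pant"),
--     ("Men", "Bottoms", "trouser"),
--     ("Men", "Bottoms", "jean"),
--     ("Men", "Bottoms", "short"),
--     ("Men", "Shoes", "shoe"),
--     ("Men", "Shoes", "sneaker"),
--     ("Men", "Shoes", "boot"),
--     ("Men", "Shoes", "sandal"),
--     ("Men", "Shoes", "slipper"),
--     ("Men", "Shoes", "loafer"),
--     ("Women", "Shoes", "shoe"),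
--     ("Women", "Shoes", "heel"),
--     ("Women", "Shoes", "sandal"),
--     ("Women", "Shoes", "boot"),
--     ("Women", "Shoes", "slipper"),
-- ]
--
-- def strict_filter(product, gender, category):
--     brick = product.get("brickNameText", "").lower()
--     restricted = False
--     matched = False
--     for g, c, k in RULES:
--         if g == gender and c == category:
--             restricted = True
--             if k in brick:
--                 matched = True
--     return matched or not restricted
-- ===== Notes on version B (the rewrite author's own statement) =====
-- stated objective: alternative
-- what changed: Replaced the nested gender/category branch cascade over per-pair keyword lists with a single linear scan of one flat (gender, category, keyword) rule table, accumulating two booleans (restricted, matched) and returning matched-or-not-restricted.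
import Mathlib
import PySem

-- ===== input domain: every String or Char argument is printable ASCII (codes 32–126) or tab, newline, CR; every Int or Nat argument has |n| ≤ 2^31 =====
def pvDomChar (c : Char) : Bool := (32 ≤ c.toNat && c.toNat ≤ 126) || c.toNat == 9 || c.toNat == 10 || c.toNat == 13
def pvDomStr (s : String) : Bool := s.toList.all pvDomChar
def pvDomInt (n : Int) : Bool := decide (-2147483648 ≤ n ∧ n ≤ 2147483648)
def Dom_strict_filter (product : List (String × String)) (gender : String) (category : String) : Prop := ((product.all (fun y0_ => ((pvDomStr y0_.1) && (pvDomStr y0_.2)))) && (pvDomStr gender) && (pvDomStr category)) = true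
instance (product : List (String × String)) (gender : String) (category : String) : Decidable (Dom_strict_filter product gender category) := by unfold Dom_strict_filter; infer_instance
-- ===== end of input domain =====

-- B replaces A's nested branch cascade by one linear scan of a flat (gender, category, keyword)
-- rule table with a (restricted, matched) accumulator (objective: alternative).

-- ===== PORT A =====
def strict_filter (product : List (String × String)) (gender : String) (category : String) : Bool :=
  let brick := PySem.Str.lower ((PySem.Dict.ofList product).getD "brickNameText" "")
  if gender == "Men" then
    if category == "Bottoms" then
      (["pant", "trouser", "jean", "short"]).any (fun x => PySem.Str.isIn x brick)
    else if category == "Shoes" then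
      (["shoe", "sneaker", "boot", "sandal", "slipper", "loafer"]).any (fun x => PySem.Str.isIn x brick)
    else true
  else if gender == "Women" then
    if category == "Shoes" then
      (["shoe", "heel", "sandal", "boot", "slipper"]).any (fun x => PySem.Str.isIn x brick)
    else true
  else true

-- ===== PORT B =====
-- module-level RULES table of Source B
def pvRules : List (String × String × String) :=
  [ ("Men", "Bottoms", "pant")
  , ("Men", "Bottoms", "trouser")
  , ("Men", "Bottoms", "jean")
  , ("Men", "Bottoms", "short")
  , ("Men", "Shoes", "shoe")
  , ("Men", "Shoes", "sneaker")
  , ("Men", "Shoes", "boot")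
  , ("Men", "Shoes", "sandal")
  , ("Men", "Shoes", "slipper")
  , ("Men", "Shoes", "loafer")
  , ("Women", "Shoes", "shoe")
  , ("Women", "Shoes", "heel")
  , ("Women", "Shoes", "sandal")
  , ("Women", "Shoes", "boot")
  , ("Women", "Shoes", "slipper") ]

def strict_filter_alt (product : List (String × String)) (gender : String) (category : String) : Bool :=
  let brick := PySem.Str.lower ((PySem.Dict.ofList product).getD "brickNameText" "")
  let st := pvRules.foldl
    (fun (st : Bool × Bool) r =>
      if r.1 == gender && r.2.1 == category then
        (true, if PySem.Str.isIn r.2.2 brick then true else st.2)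
      else st)
    (false, false)
  st.2 || !st.1

-- ===== PRECONDITION & SPEC =====
def Spec_strict_filter (product : List (String × String)) (gender : String) (category : String) (out : Bool) : Prop := out = strict_filter_alt product gender category
instance (product : List (String × String)) (gender : String) (category : String) (out : Bool) : Decidable (Spec_strict_filter product gender category out) := by unfold Spec_strict_filter; infer_instance

-- ===== CLAIM (what is proved, stated in full; the proofs are below) =====
def Claim_equal_strict_filter : Prop := ∀ (product : List (String × String)) (gender : String) (category : String), Dom_strict_filter product gender category → Spec_strict_filter product gender category (strict_filter product gender category)

-- ===== LEMMAS AND PROOFS =====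

-- ===== VERDICT (by name: the statement is the Claim_ definition above) =====
theorem strict_filter_spec : Claim_equal_strict_filter := by
  intro product gender category _
  unfold Spec_strict_filter strict_filter strict_filter_alt pvRules
  by_cases hm : gender = "Men" <;> by_cases hw : gender = "Women" <;>
    by_cases hb : category = "Bottoms" <;> by_cases hs : category = "Shoes" <;>
    simp_all [List.foldl] <;> (try split_ifs) <;> (try simp_all) <;> try ac_rfl
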